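-- pv_equiv track=rewrite | github.com/jiliangzhu/Asterion | ui/data_access.py | _derive_agent_review_status
-- ===== SOURCE A (Python) =====
-- from typing import Any
--
-- def _derive_agent_review_status(item: dict[str, Any]) -> str:
--     statuses = [item.get("rule2spec_status"), item.get("data_qa_status"), item.get("resolution_status")]
--     if any(status in {"failure", "blocked"} for status in statuses):
--         return "agent_failure"
--     if any(status == "review_required" for status in statuses):
--         return "review_required"
--     verdicts = [item.get("rule2spec_verdict"), item.get("data_qa_verdict"), item.get("resolution_verdict")]
--     if any(verdict in {"review", "block"} for verdict in verdicts):
--         return "review_required"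
--     if any(status == "success" for status in statuses):
--         return "passed"
--     return "no_agent_signal"
-- ===== SOURCE B (Python) =====
-- from typing import Any
--
-- _PRIORITY = {"agent_failure": 0, "review_required": 1, "passed": 2, "no_agent_signal": 3}
-- _STATUS_LABEL = {"failure": "agent_failure", "blocked": "agent_failure",
--                  "review_required": "review_required", "success": "passed"}
-- _VERDICT_LABEL = {"review": "review_required", "block": "review_required"}
--
-- def _derive_agent_review_status(item: dict[str, Any]) -> str:
--     best = "no_agent_signal"
--     for key, table in (("rule2spec_status", _STATUS_LABEL),
--                        ("data_qa_status", _STATUS_LABEL),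
--                        ("resolution_status", _STATUS_LABEL),
--                        ("rule2spec_verdict", _VERDICT_LABEL),
--                        ("data_qa_verdict", _VERDICT_LABEL),
--                        ("resolution_verdict", _VERDICT_LABEL)):
--         label = table.get(item.get(key))
--         if label is not None and _PRIORITY[label] < _PRIORITY[best]:
--             best = label
--     return best
-- ===== Notes on version B (the rewrite author's own statement) =====
-- stated objective: alternative
-- what changed: Replaces A's ordered cascade of four any() scans over statuses/verdicts with a single table-driven pass that maps each field value to a label and keeps the minimum-priority label seen.
import Mathlib
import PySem

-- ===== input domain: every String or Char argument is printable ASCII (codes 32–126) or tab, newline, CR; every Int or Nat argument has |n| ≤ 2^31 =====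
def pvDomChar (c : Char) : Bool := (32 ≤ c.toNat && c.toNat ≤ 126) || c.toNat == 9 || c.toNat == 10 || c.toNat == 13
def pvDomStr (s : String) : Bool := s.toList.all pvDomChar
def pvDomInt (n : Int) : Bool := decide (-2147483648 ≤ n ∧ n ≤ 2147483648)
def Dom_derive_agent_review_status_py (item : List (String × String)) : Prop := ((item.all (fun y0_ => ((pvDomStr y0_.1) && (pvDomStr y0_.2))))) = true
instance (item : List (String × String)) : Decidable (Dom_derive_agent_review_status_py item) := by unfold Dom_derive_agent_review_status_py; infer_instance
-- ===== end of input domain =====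

-- B replaces A's cascade of any() scans with a single table-driven pass tracking the
-- minimum-priority label (objective: alternative decomposition; same cost).

-- Python dict.get first-match lookup on an association list (used by both ports)
def pyGet (d : List (String × String)) (k : String) : Option String :=
  (d.find? (fun p => p.1 == k)).map (·.2)

-- ===== PORT A =====
def derive_agent_review_status_py (item : List (String × String)) : String :=
  let statuses : List (Option String) :=
    [pyGet item "rule2spec_status", pyGet item "data_qa_status",
     pyGet item "resolution_status"]
  if statuses.any (fun s => s == some "failure" || s == some "blocked") then "agent_failure"
  else if statuses.any (fun s => s == some "review_required") then "review_required"
  else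
    let verdicts : List (Option String) :=
      [pyGet item "rule2spec_verdict", pyGet item "data_qa_verdict",
       pyGet item "resolution_verdict"]
    if verdicts.any (fun v => v == some "review" || v == some "block") then "review_required"
    else if statuses.any (fun s => s == some "success") then "passed"
    else "no_agent_signal"

-- ===== PORT B =====
def pvStatusLabel : List (String × String) :=
  [("failure", "agent_failure"), ("blocked", "agent_failure"),
   ("review_required", "review_required"), ("success", "passed")]
def pvVerdictLabel : List (String × String) :=
  [("review", "review_required"), ("block", "review_required")]
def pvPriority : List (String × Int) :=
  [("agent_failure", 0), ("review_required", 1), ("passed", 2), ("no_agent_signal", 3)]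

def pyGetIntD (d : List (String × Int)) (k : String) (dflt : Int) : Int :=
  ((d.find? (fun p => p.1 == k)).map (·.2)).getD dflt

-- Source B's `_PRIORITY[label]` can never miss (labels are exactly the keys); ported as getD with
-- an unreachable default.
def derive_agent_review_status_py_alt (item : List (String × String)) : String :=
  ([("rule2spec_status", pvStatusLabel), ("data_qa_status", pvStatusLabel),
    ("resolution_status", pvStatusLabel), ("rule2spec_verdict", pvVerdictLabel),
    ("data_qa_verdict", pvVerdictLabel), ("resolution_verdict", pvVerdictLabel)]).foldl
    (fun best kt =>
      match (pyGet item kt.1).bind (fun v => pyGet kt.2 v) with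
      | none => best
      | some label =>
        if pyGetIntD pvPriority label 99 < pyGetIntD pvPriority best 99 then label
        else best)
    "no_agent_signal"

-- ===== PRECONDITION & SPEC =====
def Spec_derive_agent_review_status_py (item : List (String × String)) (out : String) : Prop := out = derive_agent_review_status_py_alt item
instance (item : List (String × String)) (out : String) : Decidable (Spec_derive_agent_review_status_py item out) := by unfold Spec_derive_agent_review_status_py; infer_instance

-- ===== CLAIM (what is proved, stated in full; the proofs are below) =====
def Claim_equal_derive_agent_review_status_py : Prop := ∀ (item : List (String × String)), Dom_derive_agent_review_status_py item → Spec_derive_agent_review_status_py item (derive_agent_review_status_py item)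

-- ===== LEMMAS AND PROOFS =====

-- the label B derives from one status / verdict lookup result
def labS (s : Option String) : Option String := s.bind (fun v => pyGet pvStatusLabel v)
def labV (v : Option String) : Option String := v.bind (fun w => pyGet pvVerdictLabel w)

set_option maxRecDepth 8192 in
lemma labS_cases (s : Option String) :
    labS s = none ∨ labS s = some "agent_failure" ∨ labS s = some "review_required" ∨
    labS s = some "passed" := by
  rcases s with _ | v
  · exact Or.inl rfl
  · simp only [labS, Option.bind_some, pvStatusLabel, pyGet, List.find?]
    cases h1 : ("failure" == v) <;> cases h2 : ("blocked" == v) <;> cases h3 : ("review_required" == v) <;> cases h4 : ("success" == v) <;> simp_all [BEq.comm]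

set_option maxRecDepth 8192 in
lemma labV_cases (v : Option String) :
    labV v = none ∨ labV v = some "review_required" := by
  rcases v with _ | w
  · exact Or.inl rfl
  · simp only [labV, Option.bind_some, pvVerdictLabel, pyGet, List.find?]
    cases h1 : ("review" == w) <;> cases h2 : ("block" == w) <;> simp_all [BEq.comm]

-- A's membership tests, expressed through B's label table
set_option maxRecDepth 8192 in
lemma test_fail (s : Option String) :
    (s == some "failure" || s == some "blocked") = (labS s == some "agent_failure") := by
  rcases s with _ | v
  · rfl
  · simp only [labS, Option.bind_some, pvStatusLabel, pyGet, List.find?]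
    cases h1 : ("failure" == v) <;> cases h2 : ("blocked" == v) <;> cases h3 : ("review_required" == v) <;> cases h4 : ("success" == v) <;> simp_all [BEq.comm]
set_option maxRecDepth 8192 in
lemma test_rr (s : Option String) :
    (s == some "review_required") = (labS s == some "review_required") := by
  rcases s with _ | v
  · rfl
  · simp only [labS, Option.bind_some, pvStatusLabel, pyGet, List.find?]
    cases h1 : ("failure" == v) <;> cases h2 : ("blocked" == v) <;> cases h3 : ("review_required" == v) <;> cases h4 : ("success" == v) <;> simp_all [BEq.comm]
set_option maxRecDepth 8192 in
lemma test_succ (s : Option String) :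
    (s == some "success") = (labS s == some "passed") := by
  rcases s with _ | v
  · rfl
  · simp only [labS, Option.bind_some, pvStatusLabel, pyGet, List.find?]
    cases h1 : ("failure" == v) <;> cases h2 : ("blocked" == v) <;> cases h3 : ("review_required" == v) <;> cases h4 : ("success" == v) <;> simp_all [BEq.comm]
set_option maxRecDepth 8192 in
lemma test_vrd (v : Option String) :
    (v == some "review" || v == some "block") = (labV v == some "review_required") := by
  rcases v with _ | w
  · rfl
  · simp only [labV, Option.bind_some, pvVerdictLabel, pyGet, List.find?]
    cases h1 : ("review" == w) <;> cases h2 : ("block" == w) <;> simp_all [BEq.comm]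

-- pointwise core: with the six lookups abstracted, the two computations agree
lemma core_eq (s1 s2 s3 v1 v2 v3 : Option String) :
    (if (s1 == some "failure" || s1 == some "blocked") || (s2 == some "failure" || s2 == some "blocked")
        || (s3 == some "failure" || s3 == some "blocked") then "agent_failure"
     else if (s1 == some "review_required") || (s2 == some "review_required")
        || (s3 == some "review_required") then "review_required"
     else if (v1 == some "review" || v1 == some "block") || (v2 == some "review" || v2 == some "block")
        || (v3 == some "review" || v3 == some "block") then "review_required"
     else if (s1 == some "success") || (s2 == some "success") || (s3 == some "success") then "passed"
     else "no_agent_signal")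
    =
    ([labS s1, labS s2, labS s3, labV v1, labV v2, labV v3].foldl
      (fun best l =>
        match l with
        | none => best
        | some label =>
          if pyGetIntD pvPriority label 99 < pyGetIntD pvPriority best 99 then label
          else best)
      "no_agent_signal") := by
  rw [test_fail s1, test_fail s2, test_fail s3, test_rr s1, test_rr s2, test_rr s3,
    test_vrd v1, test_vrd v2, test_vrd v3, test_succ s1, test_succ s2, test_succ s3]
  rcases labS_cases s1 with h1 | h1 | h1 | h1 <;>
    rcases labS_cases s2 with h2 | h2 | h2 | h2 <;>
      rcases labS_cases s3 with h3 | h3 | h3 | h3 <;>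
        rcases labV_cases v1 with h4 | h4 <;>
          rcases labV_cases v2 with h5 | h5 <;>
            rcases labV_cases v3 with h6 | h6 <;>
              rw [h1, h2, h3, h4, h5, h6] <;> decide

-- ===== VERDICT (by name: the statement is the Claim_ definition above) =====
theorem derive_agent_review_status_py_spec : Claim_equal_derive_agent_review_status_py := by
  intro item _
  unfold Spec_derive_agent_review_status_py derive_agent_review_status_py derive_agent_review_status_py_alt
  have h := core_eq (pyGet item "rule2spec_status") (pyGet item "data_qa_status")
    (pyGet item "resolution_status") (pyGet item "rule2spec_verdict")
    (pyGet item "data_qa_verdict") (pyGet item "resolution_verdict")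
  simp only [labS, labV, List.foldl_cons, List.foldl_nil] at h
  simp only [List.any_cons, List.any_nil, Bool.or_false, Bool.or_assoc, List.foldl_cons,
    List.foldl_nil] at h ⊢
  exact h
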